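-- pv_equiv track=rewrite | github.com/aphoticshaman/HungryOrca | orca_ultimate_hybrid.py | pad_to_size
-- ===== SOURCE A (Python) =====
-- def pad_to_size(g, h, w, fill=0):
--     """Pad grid to specified size"""
--     result = []
--     for r in range(h):
--         row = []
--         for c in range(w):
--             if r < len(g) and c < len(g[r]):
--                 row.append(g[r][c])
--             else:
--                 row.append(fill)
--         result.append(row)
--     return result
-- ===== SOURCE B (Python) =====
-- def pad_to_size(g, h, w, fill=0):
--     """Pad grid to h rows and w columns with fill (negative sizes act as 0, as range does)."""
--     result = []
--     for r in range(h):
--         row = list(g[r][:max(w, 0)]) if r < len(g) else []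
--         row += [fill] * (w - len(row))
--         result.append(row)
--     return result
-- ===== Notes on version B (the rewrite author's own statement) =====
-- stated objective: simpler
-- what changed: Replaces the per-cell nested loop and bounds test with per-row slicing plus list-multiplication padding: the bounds check is hoisted to once per row and the inner column loop disappears.
import Mathlib
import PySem

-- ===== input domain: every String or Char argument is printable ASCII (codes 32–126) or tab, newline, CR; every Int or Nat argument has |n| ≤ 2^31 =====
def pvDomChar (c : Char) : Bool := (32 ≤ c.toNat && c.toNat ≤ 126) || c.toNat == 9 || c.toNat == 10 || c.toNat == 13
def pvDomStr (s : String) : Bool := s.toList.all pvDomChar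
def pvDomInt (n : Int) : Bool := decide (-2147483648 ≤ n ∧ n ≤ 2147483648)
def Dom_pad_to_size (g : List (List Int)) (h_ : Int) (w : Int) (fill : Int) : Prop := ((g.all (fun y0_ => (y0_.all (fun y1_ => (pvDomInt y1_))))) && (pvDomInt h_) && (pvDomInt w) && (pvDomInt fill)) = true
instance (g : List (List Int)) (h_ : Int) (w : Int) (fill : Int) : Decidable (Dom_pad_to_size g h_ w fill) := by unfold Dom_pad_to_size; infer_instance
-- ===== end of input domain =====

-- ===== PORT A =====
-- literal port of A: nested loops over range(h) and range(w) with a per-cell bounds test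
def pad_to_size (g : List (List Int)) (h_ : Int) (w : Int) (fill : Int) : List (List Int) :=
  (PySem.List.pyRange 0 h_ 1).foldl (fun result r =>
    result ++ [(PySem.List.pyRange 0 w 1).foldl (fun row c =>
      row ++ [if r < (g.length : Int) ∧ c < ((PySem.List.pyGetD g r []).length : Int)
              then PySem.List.pyGetD (PySem.List.pyGetD g r []) c fill
              else fill]) []]) []

-- ===== PORT B =====
-- B: per-row slice g[r][:max(w,0)] then pad with [fill] * (w - len(row)); no inner column loop
def pad_to_size_alt (g : List (List Int)) (h_ : Int) (w : Int) (fill : Int) : List (List Int) :=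
  (PySem.List.pyRange 0 h_ 1).foldl (fun result r =>
    let row := if r < (g.length : Int)
               then PySem.List.slice (PySem.List.pyGetD g r []) none (some (max w 0))
               else []
    let row := row ++ PySem.List.pyRepeat [fill] (w - (row.length : Int))
    result ++ [row]) []

-- ===== PRECONDITION & SPEC =====
def Spec_pad_to_size (g : List (List Int)) (h_ : Int) (w : Int) (fill : Int) (out : List (List Int)) : Prop := out = pad_to_size_alt g h_ w fill
instance (g : List (List Int)) (h_ : Int) (w : Int) (fill : Int) (out : List (List Int)) : Decidable (Spec_pad_to_size g h_ w fill out) := by unfold Spec_pad_to_size; infer_instance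

-- ===== CLAIM (what is proved, stated in full; the proofs are below) =====
def Claim_equal_pad_to_size : Prop := ∀ (g : List (List Int)) (h_ : Int) (w : Int) (fill : Int), Dom_pad_to_size g h_ w fill → Spec_pad_to_size g h_ w fill (pad_to_size g h_ w fill)

-- ===== LEMMAS AND PROOFS =====

-- A's inner column loop over range(w), for an in-bounds row xs, is take-then-pad.
lemma rowA_take_pad (xs : List Int) (n : Nat) (fill : Int) :
    (List.range n).map (fun (k : Nat) => if ((k : Int)) < (xs.length : Int) then PySem.List.pyGetD xs (k : Int) fill else fill)
      = xs.take n ++ List.replicate (n - xs.length) fill := by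
  apply List.ext_getElem
  · simp; omega
  · intro i hi1 hi2
    have hin : i < n := by simpa using hi1
    rw [List.getElem_map, List.getElem_range]
    by_cases h : i < xs.length
    · rw [List.getElem_append_left (by simp; omega)]
      rw [List.getElem_take, if_pos (by exact_mod_cast h)]
      rw [PySem.List.pyGetD_natCast]
      simp [List.getD_eq_getElem?_getD, List.getElem?_eq_getElem h]
    · rw [List.getElem_append_right (by simp; omega)]
      rw [List.getElem_replicate, if_neg (by exact_mod_cast h)]

-- per-row equality: A's inner loop equals B's slice-and-pad row
lemma row_eq (g : List (List Int)) (w fill r : Int) :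
    (PySem.List.pyRange 0 w 1).foldl (fun row c =>
      row ++ [if r < (g.length : Int) ∧ c < ((PySem.List.pyGetD g r []).length : Int)
              then PySem.List.pyGetD (PySem.List.pyGetD g r []) c fill
              else fill]) []
    = (let row := if r < (g.length : Int)
                  then PySem.List.slice (PySem.List.pyGetD g r []) none (some (max w 0))
                  else []
       row ++ PySem.List.pyRepeat [fill] (w - (row.length : Int))) := by
  rw [PySem.List.foldl_append_singleton_eq_map, List.nil_append]
  by_cases hr : r < (g.length : Int)
  · set xs := PySem.List.pyGetD g r [] with hxs
    rw [if_pos hr, PySem.List.slice_to _ (le_max_right w 0)]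
    have hto : (max w 0).toNat = w.toNat := by omega
    rw [hto]
    dsimp only
    rw [PySem.List.pyRepeat_singleton, PySem.List.pyRange_one, List.map_map]
    have h1 : ((fun c => if r < (g.length : Int) ∧ c < (xs.length : Int) then PySem.List.pyGetD xs c fill else fill) ∘ (fun (k : Nat) => (0 : Int) + k))
        = fun (k : Nat) => if ((k : Int)) < (xs.length : Int) then PySem.List.pyGetD xs (k : Int) fill else fill := by
      funext k; simp [hr]
    have h3 : (w - ((xs.take w.toNat).length : Int)).toNat = w.toNat - xs.length := by
      rw [List.length_take]; omega
    rw [h1, h3, Int.sub_zero]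
    exact rowA_take_pad xs w.toNat fill
  · rw [if_neg hr]
    dsimp only
    rw [List.nil_append, List.length_nil, PySem.List.pyRepeat_singleton,
        PySem.List.pyRange_one, List.map_map]
    have h1 : ((fun c => if r < (g.length : Int) ∧ c < ((PySem.List.pyGetD g r []).length : Int) then PySem.List.pyGetD (PySem.List.pyGetD g r []) c fill else fill) ∘ (fun (k : Nat) => (0 : Int) + k))
        = fun (_ : Nat) => fill := by
      funext k; simp [hr]
    rw [h1]
    simp

-- ===== VERDICT (by name: the statement is the Claim_ definition above) =====
theorem pad_to_size_spec : Claim_equal_pad_to_size := by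
  intro g h_ w fill _
  unfold Spec_pad_to_size pad_to_size pad_to_size_alt
  rw [PySem.List.foldl_append_singleton_eq_map, PySem.List.foldl_append_singleton_eq_map]
  exact congrArg _ (List.map_congr_left (fun r _ => row_eq g w fill r))
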